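-- pv_equiv track=rewrite | github.com/songadaymann/E2MB-1 | python-scripts/original-scripts/full_musiclib_v3.py | choose_bass_tone
-- ===== SOURCE A (Python) =====
-- from typing import List, Tuple, Dict
--
-- def choose_bass_tone(position: int, rng_state: int, previous_pitch: int, current_pitches: List[int]) -> int:
--     """BASS-SPECIFIC: Choose chord tone with preference order and repetition"""
--     r = rng_state & 15  # More bits for variety
--
--     # REPETITION: High chance to repeat the same note (bass foundational behavior)
--     if previous_pitch != -1 and previous_pitch in current_pitches:
--         repeat_chance = 12  # 12/16 = 75% chance to repeat
--         if r < repeat_chance: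
--             return previous_pitch
--
--     # PREFERENCE ORDER: root, fourth, fifth, sixth, then less preferred others
--     preference_weights = [
--         8,  # 1. root - highest weight
--         6,  # 2. fourth - strong bass note
--         7,  # 3. fifth - very strong
--         4,  # 4. sixth - moderate
--         2,  # 5. second - less preferred
--         1,  # 6. minor fourth - rarely
--         2,  # 7. third - less preferred for bass
--         1   # 8. 7th - rarely
--     ]
--
--     # Weighted random selection
--     total_weight = sum(preference_weights)
--     rand_weight = (rng_state >> 4) % total_weight
--
--     cumulative = 0
--     for i, weight in enumerate(preference_weights):
--         cumulative += weight
--         if rand_weight < cumulative: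
--             return current_pitches[i] if i < len(current_pitches) else current_pitches[0]
--
--     # Fallback to root
--     return current_pitches[0]
-- ===== SOURCE B (Python) =====
-- from typing import List
--
-- # Same repeat guard as the original; the cumulative-weight scan is replaced by a
-- # precomputed flat expansion table (index i repeated weight_i times, 31 entries)
-- # so the selection is a single direct lookup.
--
-- _TABLE = [0]*8 + [1]*6 + [2]*7 + [3]*4 + [4]*2 + [5] + [6]*2 + [7]  # len == 31
--
-- def choose_bass_tone(position: int, rng_state: int, previous_pitch: int, current_pitches: List[int]) -> int:
--     r = rng_state & 15
--     if previous_pitch != -1 and previous_pitch in current_pitches: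
--         if r < 12:
--             return previous_pitch
--     i = _TABLE[(rng_state >> 4) % 31]
--     return current_pitches[i] if i < len(current_pitches) else current_pitches[0]
-- ===== Notes on version B (the rewrite author's own statement) =====
-- stated objective: alternative
-- what changed: Replaces the cumulative-weight scan over the preference list with a precomputed 31-entry flat expansion table, turning the weighted selection into one direct table lookup with no accumulator loop.
import Mathlib
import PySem

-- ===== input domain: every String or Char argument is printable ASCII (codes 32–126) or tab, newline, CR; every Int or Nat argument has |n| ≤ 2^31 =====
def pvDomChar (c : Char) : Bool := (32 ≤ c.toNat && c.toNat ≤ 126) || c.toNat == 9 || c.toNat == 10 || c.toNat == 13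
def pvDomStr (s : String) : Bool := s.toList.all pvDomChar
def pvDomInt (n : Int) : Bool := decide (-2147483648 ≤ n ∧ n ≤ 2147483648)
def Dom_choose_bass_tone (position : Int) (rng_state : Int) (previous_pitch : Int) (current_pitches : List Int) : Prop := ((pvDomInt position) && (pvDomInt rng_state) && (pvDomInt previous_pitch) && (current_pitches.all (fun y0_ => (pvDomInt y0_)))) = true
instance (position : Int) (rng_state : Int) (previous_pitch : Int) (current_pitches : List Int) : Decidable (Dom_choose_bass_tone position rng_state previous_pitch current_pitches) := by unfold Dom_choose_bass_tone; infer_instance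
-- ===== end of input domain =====

-- ===== PORT A =====
-- Weighted cumulative scan: for each (i, weight) in enumerate(preference_weights),
-- accumulate and return the first index whose cumulative weight exceeds rand_weight.
-- Indexing current_pitches[i] under the guard i < len is a safe get; the trailing
-- current_pitches[0] accesses (raising IndexError when empty) are excluded by Pre_,
-- so pyGet? with a .getD 0 default is exact on Pre_.
def cbtScan (current_pitches : List Int) (rand_weight : Int) :
    List (Int × Int) → Int → Option Int
  | [], _ => none
  | (i, weight) :: rest, cumulative =>
    let cumulative := cumulative + weight
    if rand_weight < cumulative then
      some (if i < (current_pitches.length : Int)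
            then (PySem.List.pyGet? current_pitches i).getD 0
            else (PySem.List.pyGet? current_pitches 0).getD 0)
    else cbtScan current_pitches rand_weight rest cumulative

def choose_bass_tone (position : Int) (rng_state : Int) (previous_pitch : Int) (current_pitches : List Int) : Int :=
  let r := PySem.Int.band rng_state 15
  let preference_weights : List Int := [8, 6, 7, 4, 2, 1, 2, 1]
  let total_weight := preference_weights.sum
  let rand_weight := PySem.Int.mod (rng_state >>> 4) total_weight
  let selection :=
    (cbtScan current_pitches rand_weight (PySem.List.enumerate preference_weights) 0).getD
      ((PySem.List.pyGet? current_pitches 0).getD 0)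
  if previous_pitch != -1 && current_pitches.contains previous_pitch then
    if r < 12 then previous_pitch else selection
  else selection

-- ===== PORT B =====
-- Flat expansion table: index i repeated weight_i times; one direct lookup.
def cbtTable : List Int := List.replicate 8 0 ++ List.replicate 6 1 ++ List.replicate 7 2
  ++ List.replicate 4 3 ++ List.replicate 2 4 ++ [5] ++ List.replicate 2 6 ++ [7]

def choose_bass_tone_alt (position : Int) (rng_state : Int) (previous_pitch : Int) (current_pitches : List Int) : Int :=
  let r := PySem.Int.band rng_state 15
  let sel :=
    let i := (PySem.List.pyGet? cbtTable (PySem.Int.mod (rng_state >>> 4) 31)).getD 0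
    if i < (current_pitches.length : Int)
    then (PySem.List.pyGet? current_pitches i).getD 0
    else (PySem.List.pyGet? current_pitches 0).getD 0
  if previous_pitch != -1 && current_pitches.contains previous_pitch then
    if r < 12 then previous_pitch else sel
  else sel

-- ===== PRECONDITION & SPEC =====
-- Pre_ excludes exactly the inputs where Python A raises: an empty current_pitches
-- (membership is then false, so the selection path always indexes and raises IndexError).
def Pre_choose_bass_tone (position : Int) (rng_state : Int) (previous_pitch : Int) (current_pitches : List Int) : Prop :=
  current_pitches ≠ []
instance (position : Int) (rng_state : Int) (previous_pitch : Int) (current_pitches : List Int) : Decidable (Pre_choose_bass_tone position rng_state previous_pitch current_pitches) := by unfold Pre_choose_bass_tone; infer_instance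
def pvWitness_choose_bass_tone : Int × Int × Int × List Int := (0, 37, -1, [40, 45, 47, 49])
def Spec_choose_bass_tone (position : Int) (rng_state : Int) (previous_pitch : Int) (current_pitches : List Int) (out : Int) : Prop := out = choose_bass_tone_alt position rng_state previous_pitch current_pitches
instance (position : Int) (rng_state : Int) (previous_pitch : Int) (current_pitches : List Int) (out : Int) : Decidable (Spec_choose_bass_tone position rng_state previous_pitch current_pitches out) := by unfold Spec_choose_bass_tone; infer_instance

-- ===== CLAIM (what is proved, stated in full; the proofs are below) =====
def Claim_equal_choose_bass_tone : Prop := ∀ (position : Int) (rng_state : Int) (previous_pitch : Int) (current_pitches : List Int), Dom_choose_bass_tone position rng_state previous_pitch current_pitches → Pre_choose_bass_tone position rng_state previous_pitch current_pitches → Spec_choose_bass_tone position rng_state previous_pitch current_pitches (choose_bass_tone position rng_state previous_pitch current_pitches)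

-- ===== LEMMAS AND PROOFS =====
-- The two selection expressions agree for every rand_weight in [0, 31).
lemma sel_eq (cp : List Int) (w : Int) (h0 : 0 ≤ w) (h31 : w < 31) :
    (cbtScan cp w (PySem.List.enumerate [8, 6, 7, 4, 2, 1, 2, 1]) 0).getD
      ((PySem.List.pyGet? cp 0).getD 0)
    = (let i := (PySem.List.pyGet? cbtTable w).getD 0;
       if i < (cp.length : Int)
       then (PySem.List.pyGet? cp i).getD 0
       else (PySem.List.pyGet? cp 0).getD 0) := by
  interval_cases w <;>
    simp [cbtScan, cbtTable, PySem.List.enumerate, PySem.List.pyGet?, PySem.List.pyIdx?]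

-- ===== VERDICT (by name: the statement is the Claim_ definition above) =====
theorem choose_bass_tone_spec : Claim_equal_choose_bass_tone := by
  intro position rng_state previous_pitch current_pitches _ _
  unfold Spec_choose_bass_tone choose_bass_tone choose_bass_tone_alt
  have h0 := PySem.Int.mod_nonneg (rng_state >>> 4) (b := 31) (by norm_num)
  have h31 := PySem.Int.mod_lt (rng_state >>> 4) (b := 31) (by norm_num)
  have hsel := sel_eq current_pitches (PySem.Int.mod (rng_state >>> 4) 31) h0 h31
  simp only [List.sum_cons, List.sum_nil] at *
  rw [show (8 + (6 + (7 + (4 + (2 + (1 + (2 + (1 + (0:Int))))))))) = 31 from by norm_num]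
  split <;> [skip; exact hsel]
  split <;> [rfl; exact hsel]
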